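-- pv_equiv track=rewrite | github.com/tyler-harpool/verdictum | fix_test_data.py | fix_crime_type_enums
-- ===== SOURCE A (Python) =====
-- def fix_crime_type_enums(content):
--     """Fix CrimeType enum values to use snake_case."""
--     replacements = {
--         '"WhiteCollar"': '"fraud"',
--         '"ViolentCrime"': '"firearms"',
--         '"DrugCrime"': '"drug_offense"',
--         '"PropertyCrime"': '"fraud"',
--         '"OrganizedCrime"': '"racketeering"',
--     }
--
--     for old, new in replacements.items():
--         content = content.replace(old, new)
--
--     return content
-- ===== SOURCE B (Python) =====
-- _MAP = {
--     'WhiteCollar': 'fraud',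
--     'ViolentCrime': 'firearms',
--     'DrugCrime': 'drug_offense',
--     'PropertyCrime': 'fraud',
--     'OrganizedCrime': 'racketeering',
-- }
--
--
-- def fix_crime_type_enums(content):
--     """Fix CrimeType enum values to use snake_case."""
--     parts = content.split('"')
--     last = len(parts) - 1
--     return '"'.join(
--         _MAP.get(p, p) if 0 < i < last else p
--         for i, p in enumerate(parts)
--     )
-- ===== Notes on version B (the rewrite author's own statement) =====
-- stated objective: alternative
-- what changed: A runs five sequential full-content str.replace scans (one per enum key); B splits the content at quote characters once and maps each interior segment through a dict lookup, a single pass with a lookup table.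
-- outside the precondition, e.g. on fix_crime_type_enums('"WhiteCollar"WhiteCollar"'): A returns '"fraud"WhiteCollar"', B returns '"fraud"fraud"'; on fix_crime_type_enums('"WhiteCollar"ViolentCrime"'): A returns '"fraud"firearms"', B returns '"fraud"firearms"'
import Mathlib
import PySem

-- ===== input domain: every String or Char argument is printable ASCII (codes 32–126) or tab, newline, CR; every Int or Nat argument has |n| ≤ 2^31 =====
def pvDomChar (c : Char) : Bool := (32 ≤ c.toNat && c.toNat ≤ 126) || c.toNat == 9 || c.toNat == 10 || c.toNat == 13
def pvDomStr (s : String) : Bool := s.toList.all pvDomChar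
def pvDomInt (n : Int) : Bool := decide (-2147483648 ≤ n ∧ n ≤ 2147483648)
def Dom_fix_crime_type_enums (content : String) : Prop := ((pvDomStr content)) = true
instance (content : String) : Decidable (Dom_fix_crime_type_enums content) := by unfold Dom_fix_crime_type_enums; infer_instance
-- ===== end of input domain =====

-- B replaces A's five sequential full-string `.replace` scans by one split-on-'"' pass with a
-- dict lookup on the interior segments (objective: alternative single-pass algorithm, same result).

-- ===== PORT A =====
-- the dict literal's items, in insertion order (A iterates replacements.items())
def pvReplacements : List (String × String) :=
  [("\"WhiteCollar\"", "\"fraud\""),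
   ("\"ViolentCrime\"", "\"firearms\""),
   ("\"DrugCrime\"", "\"drug_offense\""),
   ("\"PropertyCrime\"", "\"fraud\""),
   ("\"OrganizedCrime\"", "\"racketeering\"")]

def fix_crime_type_enums (content : String) : String :=
  pvReplacements.foldl (fun c p => PySem.Str.replace c p.1 p.2) content

-- ===== PORT B =====
-- the _MAP dict of Source B, keys/values as char lists (strings are ported on List Char)
def pvMapL : List (List Char × List Char) :=
  [("WhiteCollar".toList, "fraud".toList),
   ("ViolentCrime".toList, "firearms".toList),
   ("DrugCrime".toList, "drug_offense".toList),
   ("PropertyCrime".toList, "fraud".toList),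
   ("OrganizedCrime".toList, "racketeering".toList)]

def fix_crime_type_enums_alt (content : String) : String :=
  let parts := PySem.Chars.splitOn content.toList ['"']          -- content.split('"')
  let last : Int := PySem.List.len parts - 1
  String.ofList (PySem.Chars.join ['"']
    ((PySem.List.enumerate parts).map (fun ip =>
      if 0 < ip.1 ∧ ip.1 < last then PySem.Dict.getD ⟨pvMapL⟩ ip.2 ip.2 else ip.2)))

-- ===== PRECONDITION & SPEC =====
def pvBodies : List (List Char) :=
  ["WhiteCollar".toList, "ViolentCrime".toList, "DrugCrime".toList,
   "PropertyCrime".toList, "OrganizedCrime".toList]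

-- Pre_ excludes contents in which two adjacent quote-delimited segments are both enum names, i.e.
-- two enum-key occurrences share a quote character (see the cited example in the claim): there A's
-- five sequential replaces consume the shared quote in dict-order-dependent cascades, which is
-- accidental behaviour.
def Pre_fix_crime_type_enums (content : String) : Prop :=
  List.IsChain (fun a b => ¬(a ∈ pvBodies ∧ b ∈ pvBodies))
    ((PySem.Chars.splitOn content.toList ['"']).tail.dropLast)
instance (content : String) : Decidable (Pre_fix_crime_type_enums content) := by
  unfold Pre_fix_crime_type_enums; infer_instance

def pvWitness_fix_crime_type_enums : String := "    \"crime_type\": \"WhiteCollar\","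

def Spec_fix_crime_type_enums (content : String) (out : String) : Prop := out = fix_crime_type_enums_alt content
instance (content : String) (out : String) : Decidable (Spec_fix_crime_type_enums content out) := by unfold Spec_fix_crime_type_enums; infer_instance

-- ===== CLAIM (what is proved, stated in full; the proofs are below) =====
def Claim_equal_fix_crime_type_enums : Prop := ∀ (content : String), Dom_fix_crime_type_enums content → Pre_fix_crime_type_enums content → Spec_fix_crime_type_enums content (fix_crime_type_enums content)

-- ===== LEMMAS AND PROOFS =====

def pvRepl (o : Char) (os new : List Char) : List Char → List Char
  | [] => []
  | c :: t =>
    if (o :: os).isPrefixOf (c :: t) then new ++ pvRepl o os new (t.drop os.length)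
    else c :: pvRepl o os new t
termination_by l => l.length
decreasing_by
  · simpa using Nat.lt_succ_of_le (List.length_drop .. ▸ Nat.sub_le _ _)
  · simp

theorem pvRepl_cons (o : Char) (os new : List Char) (c : Char) (t : List Char) :
    pvRepl o os new (c :: t) =
      if (o :: os).isPrefixOf (c :: t) then new ++ pvRepl o os new (t.drop os.length)
      else c :: pvRepl o os new t := by
  rw [pvRepl]

theorem pvRepl_nil (o : Char) (os new : List Char) : pvRepl o os new [] = [] := by
  simp [pvRepl]

theorem replace_go_eq (o : Char) (os new : List Char) :
    ∀ (fuel : Nat) (l acc : List Char), l.length ≤ fuel →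
      PySem.Chars.replace.go (o :: os) new fuel l acc = acc.reverse ++ pvRepl o os new l := by
  intro fuel
  induction fuel with
  | zero =>
    intro l acc h
    have : l = [] := List.eq_nil_of_length_eq_zero (Nat.le_zero.mp h)
    subst this
    simp [PySem.Chars.replace.go, pvRepl]
  | succ n ih =>
    intro l acc h
    cases l with
    | nil => simp [PySem.Chars.replace.go, pvRepl]
    | cons c t =>
      rw [PySem.Chars.replace.go, pvRepl_cons]
      split_ifs with hp
      · rw [ih]
        · simp [List.drop_succ_cons]
        · simp at h ⊢
          omega
      · rw [ih t (c :: acc) (by simp at h ⊢; omega)]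
        simp

theorem replace_eq_pvRepl (s : List Char) (o : Char) (os new : List Char) :
    PySem.Chars.replace s (o :: os) new = pvRepl o os new s := by
  rw [PySem.Chars.replace, if_neg (by simp)]
  rw [replace_go_eq o os new s.length s [] le_rfl]
  simp

def pvSplit : List Char → List (List Char)
  | [] => [[]]
  | c :: t => if c = '"' then [] :: pvSplit t else (pvSplit t).modifyHead (c :: ·)

theorem splitOn_go_eq :
    ∀ (fuel : Nat) (l cur : List Char) (acc : List (List Char)), l.length ≤ fuel →
      PySem.Chars.splitOn.go ['"'] fuel l cur acc =
        acc.reverse ++ (pvSplit l).modifyHead (cur.reverse ++ ·) := by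
  intro fuel
  induction fuel with
  | zero =>
    intro l cur acc h
    have : l = [] := List.eq_nil_of_length_eq_zero (Nat.le_zero.mp h)
    subst this
    simp [PySem.Chars.splitOn.go, pvSplit]
  | succ n ih =>
    intro l cur acc h
    cases l with
    | nil => simp [PySem.Chars.splitOn.go, pvSplit]
    | cons c t =>
      rw [PySem.Chars.splitOn.go]
      by_cases hc : c = '"'
      · subst hc
        rw [if_pos (by simp)]
        rw [ih _ _ _ (by simp at h ⊢; omega)]
        simp [pvSplit]
        cases pvSplit t <;> simp
      · rw [if_neg (by simp [List.isPrefixOf]; exact fun hcq => hc hcq.symm)]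
        rw [ih t (c :: cur) acc (by simp at h ⊢; omega)]
        simp [pvSplit, if_neg hc]
        cases pvSplit t <;> simp

theorem splitOn_eq_pvSplit (s : List Char) :
    PySem.Chars.splitOn s ['"'] = pvSplit s := by
  rw [PySem.Chars.splitOn, splitOn_go_eq (s.length + 1) s [] [] (by omega)]
  cases pvSplit s <;> simp

theorem pvSplit_ne_nil (l : List Char) : pvSplit l ≠ [] := by
  induction l with
  | nil => simp [pvSplit]
  | cons c t ih =>
    simp only [pvSplit]
    split_ifs
    · simp
    · cases h : pvSplit t with
      | nil => exact absurd h ih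
      | cons => simp

theorem pvSplit_quote_free (l : List Char) : ∀ x ∈ pvSplit l, '"' ∉ x := by
  induction l with
  | nil => simp [pvSplit]
  | cons c t ih =>
    simp only [pvSplit]
    split_ifs with hc
    · intro x hx
      rcases List.mem_cons.mp hx with h | h
      · simp [h]
      · exact ih x h
    · intro x hx
      cases h : pvSplit t with
      | nil => exact absurd h (pvSplit_ne_nil t)
      | cons y ys =>
        rw [h] at hx
        simp only [List.modifyHead] at hx
        rcases List.mem_cons.mp hx with h' | h'
        · subst h'
          intro hm
          rcases List.mem_cons.mp hm with hm | hm
          · exact hc hm.symm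
          · exact ih y (by rw [h]; simp) hm
        · exact ih x (by rw [h]; exact List.mem_cons_of_mem _ h')

def pvJoinQ : List (List Char) → List Char
  | [] => []
  | [s] => s
  | s :: s2 :: r => s ++ '"' :: pvJoinQ (s2 :: r)

def pvMapNL (f : List Char → List Char) : List (List Char) → List (List Char)
  | [] => []
  | [s] => [s]
  | s :: s2 :: r => f s :: pvMapNL f (s2 :: r)

def pvF (b w : List Char) (x : List Char) : List Char := if x = b then w else x

theorem pvJoinQ_pvSplit (l : List Char) : pvJoinQ (pvSplit l) = l := by
  induction l with
  | nil => simp [pvSplit, pvJoinQ]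
  | cons c t ih =>
    simp only [pvSplit]
    split_ifs with hc
    · subst hc
      cases h : pvSplit t with
      | nil => exact absurd h (pvSplit_ne_nil t)
      | cons y ys =>
        rw [h] at ih
        simp [pvJoinQ, ← ih]
    · cases h : pvSplit t with
      | nil => exact absurd h (pvSplit_ne_nil t)
      | cons y ys =>
        rw [h] at ih
        cases ys with
        | nil => simp [pvJoinQ] at ih ⊢; simp [ih]
        | cons z zs => simp [pvJoinQ] at ih ⊢; simp [ih]

theorem join_eq_pvJoinQ (parts : List (List Char)) :
    PySem.Chars.join ['"'] parts = pvJoinQ parts := by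
  induction parts with
  | nil => simp [PySem.Chars.join, pvJoinQ, List.intercalate]
  | cons s rest ih =>
    cases rest with
    | nil => simp [PySem.Chars.join, pvJoinQ, List.intercalate]
    | cons s2 r =>
      simp only [PySem.Chars.join, List.intercalate] at ih ⊢
      simp [pvJoinQ]
      simpa using ih

theorem pvRepl_peel (os new : List Char) (a : List Char) (ha : '"' ∉ a) (r : List Char) :
    pvRepl '"' os new (a ++ r) = a ++ pvRepl '"' os new r := by
  induction a with
  | nil => simp
  | cons c a' ih =>
    have hc : c ≠ '"' := fun h => ha (by simp [h])
    rw [List.cons_append, pvRepl_cons, if_neg]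
    · rw [ih (fun h => ha (List.mem_cons_of_mem _ h))]; simp
    · simp [List.isPrefixOf]
      intro h
      exact absurd h.symm hc

theorem prefix_quote_iff (b s1 z : List Char) (hb : '"' ∉ b) (hs : '"' ∉ s1) :
    ((b ++ ['"']).isPrefixOf (s1 ++ '"' :: z)) = (b = s1) := by
  induction b generalizing s1 with
  | nil =>
    cases s1 with
    | nil => simp [List.isPrefixOf]
    | cons c s1' =>
      have hc : c ≠ '"' := fun h => hs (by simp [h])
      simp [List.isPrefixOf]
      exact fun h => absurd h.symm hc
  | cons x b' ih =>
    have hx : x ≠ '"' := fun h => hb (by simp [h])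
    cases s1 with
    | nil =>
      simp [List.isPrefixOf]
      exact fun h => absurd h hx
    | cons c s1' =>
      have ih' := ih s1' (fun h => hb (List.mem_cons_of_mem _ h)) (fun h => hs (List.mem_cons_of_mem _ h))
      simp only [List.cons_append, List.isPrefixOf, Bool.and_eq_true, beq_iff_eq, ih',
        List.cons.injEq]

theorem not_prefix_quote (b s1 : List Char) (hs : '"' ∉ s1) :
    ¬ (b ++ ['"']).isPrefixOf s1 = true := by
  intro h
  have := (List.isPrefixOf_iff_prefix.mp h).subset (a := '"') (by simp)
  exact hs this

theorem pvJoinQ_cons (s : List Char) (l : List (List Char)) (h : l ≠ []) :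
    pvJoinQ (s :: l) = s ++ '"' :: pvJoinQ l := by
  cases l with
  | nil => exact absurd rfl h
  | cons a as => rfl

theorem pvMapNL_cons₂ (f : List Char → List Char) (x y : List Char) (l : List (List Char)) :
    pvMapNL f (x :: y :: l) = f x :: pvMapNL f (y :: l) := rfl

theorem pvMapNL_ne_nil (f : List Char → List Char) (l : List (List Char)) (h : l ≠ []) :
    pvMapNL f l ≠ [] := by
  cases l with
  | nil => exact absurd rfl h
  | cons a as => cases as <;> simp [pvMapNL]

theorem pass_core (b w : List Char) (hb : '"' ∉ b) :
    ∀ (n : Nat) (rest : List (List Char)), rest.length ≤ n → rest ≠ [] →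
      (∀ x ∈ rest, '"' ∉ x) →
      List.IsChain (fun x y => ¬(x = b ∧ y = b)) rest.dropLast →
      pvRepl '"' (b ++ ['"']) ('"' :: w ++ ['"']) ('"' :: pvJoinQ rest) =
        '"' :: pvJoinQ (pvMapNL (pvF b w) rest) := by
  intro n
  induction n with
  | zero =>
    intro rest hn hne _ _
    exact absurd (List.eq_nil_of_length_eq_zero (Nat.le_zero.mp hn)) hne
  | succ n ih =>
    intro rest hn hne hqf hch
    match rest with
    | [s] =>
      have hs : '"' ∉ s := hqf s (by simp)
      rw [show pvJoinQ [s] = s from rfl]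
      rw [pvRepl_cons, if_neg]
      · rw [show s = s ++ [] by simp, pvRepl_peel _ _ s hs, pvRepl_nil]
        simp [pvMapNL, pvJoinQ]
      · simp only [List.isPrefixOf, Bool.and_eq_true, beq_self_eq_true, true_and]
        exact not_prefix_quote b s hs
    | s1 :: s2 :: r' =>
      have hs1 : '"' ∉ s1 := hqf s1 (by simp)
      have hs2 : '"' ∉ s2 := hqf s2 (by simp)
      have hJ : pvJoinQ (s1 :: s2 :: r') = s1 ++ '"' :: pvJoinQ (s2 :: r') := rfl
      rw [hJ, pvRepl_cons]
      have hcond : ((('"' :: (b ++ ['"'])).isPrefixOf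
          ('"' :: (s1 ++ '"' :: pvJoinQ (s2 :: r')))) = true) = (b = s1) := by
        simp only [List.isPrefixOf, Bool.and_eq_true, beq_self_eq_true, true_and]
        exact prefix_quote_iff b s1 _ hb hs1
      by_cases hmatch : b = s1
      · rw [if_pos (hcond ▸ hmatch)]
        have hdrop : List.drop (b ++ ['"']).length (s1 ++ '"' :: pvJoinQ (s2 :: r')) =
            pvJoinQ (s2 :: r') := by
          rw [← hmatch,
            show b ++ '"' :: pvJoinQ (s2 :: r') = (b ++ ['"']) ++ pvJoinQ (s2 :: r') by simp,
            List.drop_left]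
        rw [hdrop]
        have hfs1 : pvF b w s1 = w := by simp [pvF, ← hmatch]
        cases r' with
        | nil =>
          rw [show pvJoinQ [s2] = s2 from rfl,
            show s2 = s2 ++ [] by simp, pvRepl_peel _ _ s2 hs2, pvRepl_nil]
          simp [pvMapNL, hfs1, pvJoinQ, pvJoinQ_cons]
        | cons r2 r'' =>
          have hch' : (s1 = b → ¬s2 = b) ∧
              List.IsChain (fun x y => x = b → ¬y = b) (s2 :: (r2 :: r'').dropLast) := by
            simpa using hch
          have hs2ne : s2 ≠ b := hch'.1 hmatch.symm
          rw [pvJoinQ_cons s2 (r2 :: r'') (by simp),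
            show s2 ++ '"' :: pvJoinQ (r2 :: r'') = s2 ++ ('"' :: pvJoinQ (r2 :: r'')) from rfl,
            pvRepl_peel _ _ s2 hs2]
          rw [ih (r2 :: r'') (by simp at hn ⊢; omega) (by simp)
            (fun x hx => hqf x (by simp [hx]))
            (by
              rcases r'' with _ | ⟨r3, r'''⟩
              · simp
              · have hch3 : (s1 = b → ¬s2 = b) ∧ (s2 = b → ¬r2 = b) ∧
                    List.IsChain (fun x y => x = b → ¬y = b) (r2 :: (r3 :: r''').dropLast) := by
                  simpa using hch
                simpa using hch3.2.2)]
          rw [pvMapNL_cons₂, pvMapNL_cons₂, hfs1, show pvF b w s2 = s2 by simp [pvF, hs2ne]]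
          rw [pvJoinQ_cons w (s2 :: pvMapNL (pvF b w) (r2 :: r'')) (by simp),
            pvJoinQ_cons s2 _ (pvMapNL_ne_nil _ _ (by simp))]
          simp
      · rw [if_neg (by rw [hcond]; exact hmatch)]
        rw [show s1 ++ '"' :: pvJoinQ (s2 :: r') = s1 ++ ('"' :: pvJoinQ (s2 :: r')) from rfl,
          pvRepl_peel _ _ s1 hs1]
        rw [ih (s2 :: r') (by simp at hn ⊢; omega) (by simp)
          (fun x hx => hqf x (by simp [hx]))
          (by
            rcases r' with _ | ⟨r2, r''⟩
            · simp
            · have hch2 : (s1 = b → ¬s2 = b) ∧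
                  List.IsChain (fun x y => x = b → ¬y = b) (s2 :: (r2 :: r'').dropLast) := by
                simpa using hch
              simpa using hch2.2)]
        rw [pvMapNL_cons₂, show pvF b w s1 = s1 by simp [pvF]; intro h; exact absurd h.symm hmatch,
          pvJoinQ_cons s1 _ (pvMapNL_ne_nil _ _ (by simp))]

theorem pass_top (b w : List Char) (hb : '"' ∉ b)
    (s0 : List Char) (hs0 : '"' ∉ s0) (tail : List (List Char))
    (ht : ∀ x ∈ tail, '"' ∉ x)
    (hc : List.IsChain (fun x y => ¬(x = b ∧ y = b)) tail.dropLast) :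
    pvRepl '"' (b ++ ['"']) ('"' :: w ++ ['"']) (pvJoinQ (s0 :: tail)) =
      pvJoinQ (s0 :: pvMapNL (pvF b w) tail) := by
  cases tail with
  | nil =>
    rw [show pvJoinQ [s0] = s0 from rfl, show s0 = s0 ++ [] by simp,
      pvRepl_peel _ _ s0 hs0, pvRepl_nil]
    rfl
  | cons t1 ts =>
    rw [pvJoinQ_cons s0 _ (by simp), pvRepl_peel _ _ s0 hs0,
      pass_core b w hb (t1 :: ts).length (t1 :: ts) le_rfl (by simp) ht hc,
      pvJoinQ_cons s0 _ (pvMapNL_ne_nil _ _ (by simp))]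

theorem pvMapNL_qf (f : List Char → List Char) (l : List (List Char))
    (hl : ∀ x ∈ l, '"' ∉ x) (hf : ∀ x, '"' ∉ x → '"' ∉ f x) :
    ∀ x ∈ pvMapNL f l, '"' ∉ x := by
  induction l with
  | nil => simp [pvMapNL]
  | cons a as ih =>
    cases as with
    | nil => simpa [pvMapNL] using hl
    | cons a2 as' =>
      rw [pvMapNL_cons₂]
      intro x hx
      rcases List.mem_cons.mp hx with h | h
      · exact h ▸ hf a (hl a (by simp))
      · exact ih (fun y hy => hl y (List.mem_cons_of_mem _ hy)) x h

theorem pvMapNL_dropLast (f : List Char → List Char) (l : List (List Char)) :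
    (pvMapNL f l).dropLast = l.dropLast.map f := by
  induction l with
  | nil => simp [pvMapNL]
  | cons a as ih =>
    cases as with
    | nil => simp [pvMapNL]
    | cons a2 as' =>
      rw [pvMapNL_cons₂]
      rw [List.dropLast_cons_of_ne_nil (pvMapNL_ne_nil _ _ (by simp)),
        List.dropLast_cons_of_ne_nil (by simp), List.map_cons, ih]

theorem pvMapNL_comp (f g : List Char → List Char) (l : List (List Char)) :
    pvMapNL f (pvMapNL g l) = pvMapNL (fun x => f (g x)) l := by
  induction l with
  | nil => simp [pvMapNL]
  | cons a as ih =>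
    cases as with
    | nil => simp [pvMapNL]
    | cons a2 as' =>
      obtain ⟨y, ys, hy⟩ : ∃ y ys, pvMapNL g (a2 :: as') = y :: ys := by
        cases as' <;> exact ⟨_, _, rfl⟩
      rw [pvMapNL_cons₂, pvMapNL_cons₂, hy, pvMapNL_cons₂, ← hy, ih]

theorem pvMapNL_congr (f g : List Char → List Char) (h : ∀ x, f x = g x)
    (l : List (List Char)) : pvMapNL f l = pvMapNL g l := by
  have : f = g := funext h
  rw [this]

theorem chain_per_pass (b : List Char) (hb : b ∈ pvBodies) (l : List (List Char))
    (h : List.IsChain (fun x y => ¬(x ∈ pvBodies ∧ y ∈ pvBodies)) l) :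
    List.IsChain (fun x y => ¬(x = b ∧ y = b)) l :=
  h.imp (fun _ _ hxy ⟨hx, hy⟩ => hxy ⟨hx ▸ hb, hy ▸ hb⟩)

theorem chain_pres (b w : List Char) (hw : w ∉ pvBodies) (l : List (List Char))
    (h : List.IsChain (fun x y => ¬(x ∈ pvBodies ∧ y ∈ pvBodies)) l.dropLast) :
    List.IsChain (fun x y => ¬(x ∈ pvBodies ∧ y ∈ pvBodies)) (pvMapNL (pvF b w) l).dropLast := by
  rw [pvMapNL_dropLast]
  rw [List.isChain_map]
  refine h.imp ?_
  intro x y hxy ⟨hx, hy⟩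
  refine hxy ⟨?_, ?_⟩
  · by_cases h' : x = b
    · exact absurd (by simpa [pvF, h'] using hx) hw
    · simpa [pvF, h'] using hx
  · by_cases h' : y = b
    · exact absurd (by simpa [pvF, h'] using hy) hw
    · simpa [pvF, h'] using hy

theorem enum_mapNL (F : List Char → List Char) :
    ∀ (tail : List (List Char)) (s K : Int), 1 ≤ s → K = s + tail.length - 1 →
      ((PySem.List.enumerate tail s).map (fun ip =>
        if 0 < ip.1 ∧ ip.1 < K then F ip.2 else ip.2)) = pvMapNL F tail := by
  intro tail
  induction tail with
  | nil => intro s K _ _; rfl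
  | cons x t ih =>
    intro s K hs hK
    rw [PySem.List.enumerate_cons, List.map_cons]
    cases t with
    | nil =>
      rw [if_neg (by simp at hK; omega)]
      rfl
    | cons y t' =>
      rw [if_pos (by constructor; omega; simp at hK; omega)]
      rw [ih (s + 1) K (by omega) (by simp at hK ⊢; omega), pvMapNL_cons₂]

theorem comp_eq_lookup (x : List Char) :
    pvF "OrganizedCrime".toList "racketeering".toList
      (pvF "PropertyCrime".toList "fraud".toList
        (pvF "DrugCrime".toList "drug_offense".toList
          (pvF "ViolentCrime".toList "firearms".toList
            (pvF "WhiteCollar".toList "fraud".toList x)))) =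
      PySem.Dict.getD ⟨pvMapL⟩ x x := by
  by_cases h1 : x = "WhiteCollar".toList
  · subst h1; decide
  by_cases h2 : x = "ViolentCrime".toList
  · subst h2; decide
  by_cases h3 : x = "DrugCrime".toList
  · subst h3; decide
  by_cases h4 : x = "PropertyCrime".toList
  · subst h4; decide
  by_cases h5 : x = "OrganizedCrime".toList
  · subst h5; decide
  simp only [pvF, if_neg h1, if_neg h2, if_neg h3, if_neg h4, if_neg h5,
    PySem.Dict.getD, PySem.Dict.get?, pvMapL, List.find?]
  have e1 : ("WhiteCollar".toList == x) = false := beq_eq_false_iff_ne.mpr (Ne.symm h1)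
  have e2 : ("ViolentCrime".toList == x) = false := beq_eq_false_iff_ne.mpr (Ne.symm h2)
  have e3 : ("DrugCrime".toList == x) = false := beq_eq_false_iff_ne.mpr (Ne.symm h3)
  have e4 : ("PropertyCrime".toList == x) = false := beq_eq_false_iff_ne.mpr (Ne.symm h4)
  have e5 : ("OrganizedCrime".toList == x) = false := beq_eq_false_iff_ne.mpr (Ne.symm h5)
  simp only [e1, e2, e3, e4, e5, Option.map_none, Option.getD_none]

-- ===== VERDICT (by name: the statement is the Claim_ definition above) =====
theorem fix_crime_type_enums_spec : Claim_equal_fix_crime_type_enums := by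
  intro content _ hpre
  unfold Spec_fix_crime_type_enums
  obtain ⟨s0, t0, hsplit⟩ : ∃ s0 t0, pvSplit content.toList = s0 :: t0 := by
    cases h : pvSplit content.toList with
    | nil => exact absurd h (pvSplit_ne_nil content.toList)
    | cons a as => exact ⟨a, as, rfl⟩
  have hqf := pvSplit_quote_free content.toList
  rw [hsplit] at hqf
  have hqf0 : '"' ∉ s0 := hqf s0 (by simp)
  have hqft : ∀ x ∈ t0, '"' ∉ x := fun x hx => hqf x (List.mem_cons_of_mem _ hx)
  have hprem : List.IsChain (fun x y => ¬(x ∈ pvBodies ∧ y ∈ pvBodies)) t0.dropLast := by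
    unfold Pre_fix_crime_type_enums at hpre
    rw [splitOn_eq_pvSplit, hsplit] at hpre
    simpa using hpre
  have hjoin : pvJoinQ (s0 :: t0) = content.toList := by
    rw [← hsplit]; exact pvJoinQ_pvSplit content.toList
  -- abbreviations for the five bodies and replacement words
  set b1 := "WhiteCollar".toList
  set b2 := "ViolentCrime".toList
  set b3 := "DrugCrime".toList
  set b4 := "PropertyCrime".toList
  set b5 := "OrganizedCrime".toList
  set w1 := "fraud".toList
  set w2 := "firearms".toList
  set w3 := "drug_offense".toList
  set w5 := "racketeering".toList
  -- the A side as five pvRepl passes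
  have hA : fix_crime_type_enums content = String.ofList
      (pvRepl '"' (b5 ++ ['"']) ('"' :: w5 ++ ['"'])
        (pvRepl '"' (b4 ++ ['"']) ('"' :: w1 ++ ['"'])
          (pvRepl '"' (b3 ++ ['"']) ('"' :: w3 ++ ['"'])
            (pvRepl '"' (b2 ++ ['"']) ('"' :: w2 ++ ['"'])
              (pvRepl '"' (b1 ++ ['"']) ('"' :: w1 ++ ['"']) content.toList))))) := by
    simp only [fix_crime_type_enums, pvReplacements, List.foldl_cons, List.foldl_nil]
    simp only [PySem.Str.replace, String.toList_ofList]
    rw [show ("\"WhiteCollar\"" : String).toList = '"' :: (b1 ++ ['"']) by decide,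
      show ("\"ViolentCrime\"" : String).toList = '"' :: (b2 ++ ['"']) by decide,
      show ("\"DrugCrime\"" : String).toList = '"' :: (b3 ++ ['"']) by decide,
      show ("\"PropertyCrime\"" : String).toList = '"' :: (b4 ++ ['"']) by decide,
      show ("\"OrganizedCrime\"" : String).toList = '"' :: (b5 ++ ['"']) by decide,
      show ("\"fraud\"" : String).toList = '"' :: w1 ++ ['"'] by decide,
      show ("\"firearms\"" : String).toList = '"' :: w2 ++ ['"'] by decide,
      show ("\"drug_offense\"" : String).toList = '"' :: w3 ++ ['"'] by decide,
      show ("\"racketeering\"" : String).toList = '"' :: w5 ++ ['"'] by decide]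
    simp only [replace_eq_pvRepl]
  -- run the five passes with their invariants
  have hd1 : ('"' : Char) ∉ b1 := by decide
  have hd2 : ('"' : Char) ∉ b2 := by decide
  have hd3 : ('"' : Char) ∉ b3 := by decide
  have hd4 : ('"' : Char) ∉ b4 := by decide
  have hd5 : ('"' : Char) ∉ b5 := by decide
  have hqfF : ∀ (b w : List Char), ('"' : Char) ∉ w → ∀ x, '"' ∉ x → ('"' : Char) ∉ pvF b w x := by
    intro b w hww x hx
    unfold pvF
    split_ifs <;> assumption
  have hm1 : b1 ∈ pvBodies := by decide
  have hm2 : b2 ∈ pvBodies := by decide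
  have hm3 : b3 ∈ pvBodies := by decide
  have hm4 : b4 ∈ pvBodies := by decide
  have hm5 : b5 ∈ pvBodies := by decide
  have hw1 : w1 ∉ pvBodies := by decide
  have hw2 : w2 ∉ pvBodies := by decide
  have hw3 : w3 ∉ pvBodies := by decide
  have hw1 : w1 ∉ pvBodies := by decide
  have hww1 : ('"' : Char) ∉ w1 := by decide
  have hww2 : ('"' : Char) ∉ w2 := by decide
  have hww3 : ('"' : Char) ∉ w3 := by decide
  have hww1 : ('"' : Char) ∉ w1 := by decide
  set t1 := pvMapNL (pvF b1 w1) t0 with ht1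
  set t2 := pvMapNL (pvF b2 w2) t1 with ht2
  set t3 := pvMapNL (pvF b3 w3) t2 with ht3
  set t4 := pvMapNL (pvF b4 w1) t3 with ht4
  have hp1 := pass_top b1 w1 hd1 s0 hqf0 t0 hqft (chain_per_pass b1 hm1 _ hprem)
  have hqft1 : ∀ x ∈ t1, '"' ∉ x := pvMapNL_qf _ t0 hqft (hqfF b1 w1 hww1)
  have hprem1 := chain_pres b1 w1 hw1 t0 hprem
  have hp2 := pass_top b2 w2 hd2 s0 hqf0 t1 hqft1 (chain_per_pass b2 hm2 _ hprem1)
  have hqft2 : ∀ x ∈ t2, '"' ∉ x := pvMapNL_qf _ t1 hqft1 (hqfF b2 w2 hww2)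
  have hprem2 := chain_pres b2 w2 hw2 t1 hprem1
  have hp3 := pass_top b3 w3 hd3 s0 hqf0 t2 hqft2 (chain_per_pass b3 hm3 _ hprem2)
  have hqft3 : ∀ x ∈ t3, '"' ∉ x := pvMapNL_qf _ t2 hqft2 (hqfF b3 w3 hww3)
  have hprem3 := chain_pres b3 w3 hw3 t2 hprem2
  have hp4 := pass_top b4 w1 hd4 s0 hqf0 t3 hqft3 (chain_per_pass b4 hm4 _ hprem3)
  have hqft4 : ∀ x ∈ t4, '"' ∉ x := pvMapNL_qf _ t3 hqft3 (hqfF b4 w1 hww1)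
  have hprem4 := chain_pres b4 w1 hw1 t3 hprem3
  have hp5 := pass_top b5 w5 hd5 s0 hqf0 t4 hqft4 (chain_per_pass b5 hm5 _ hprem4)
  rw [hA, ← hjoin, hp1, hp2, hp3, hp4, hp5]
  -- the B side
  simp only [fix_crime_type_enums_alt]
  rw [splitOn_eq_pvSplit, hsplit]
  rw [show PySem.List.enumerate (s0 :: t0) = (0, s0) :: PySem.List.enumerate t0 (0 + 1) from
    PySem.List.enumerate_cons s0 t0 0]
  rw [List.map_cons]
  rw [if_neg (by simp)]
  rw [show (0 : Int) + 1 = 1 by norm_num]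
  rw [enum_mapNL (fun x => PySem.Dict.getD ⟨pvMapL⟩ x x) t0 1
    (PySem.List.len (s0 :: t0) - 1) le_rfl (by simp [PySem.List.len])]
  rw [join_eq_pvJoinQ]
  -- both sides are pvJoinQ (s0 :: …): compose and compare the interior maps
  rw [ht4, ht3, ht2, ht1, pvMapNL_comp, pvMapNL_comp, pvMapNL_comp, pvMapNL_comp]
  refine congrArg String.ofList (congrArg pvJoinQ (congrArg (List.cons s0) ?_))
  refine pvMapNL_congr _ _ (fun x => ?_) t0
  exact comp_eq_lookup x
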